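-- pv_equiv track=rewrite | github.com/yashN1246826/DeadliftAnlayser | app.py | detect_reps
-- ===== SOURCE A (Python) =====
-- def detect_reps(hip_angles, threshold=130, min_frames=10):
--     reps, in_rep, rep_start = [], False, 0
--     for i, angle in enumerate(hip_angles):
--         if not in_rep and angle < threshold:
--             in_rep, rep_start = True, i
--         elif in_rep and angle >= threshold:
--             if i - rep_start >= min_frames:
--                 reps.append((rep_start, i))
--             in_rep = False
--     return reps
-- ===== SOURCE B (Python) =====
-- def detect_reps(hip_angles, threshold=130, min_frames=10):
--     # Segment the sequence into maximal runs of constant (angle < threshold),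
--     # then emit every non-final below-threshold run of sufficient length.
--     runs = []
--     cur = None  # (below, start, length)
--     for i, angle in enumerate(hip_angles):
--         below = angle < threshold
--         if cur is None:
--             cur = (below, i, 1)
--         elif cur[0] == below:
--             cur = (below, cur[1], cur[2] + 1)
--         else:
--             runs.append(cur)
--             cur = (below, i, 1)
--     if cur is not None:
--         runs.append(cur)
--     return [(s, s + n) for (below, s, n) in runs[:-1] if below and n >= min_frames]
-- ===== Notes on version B (the rewrite author's own statement) =====
-- stated objective: alternative
-- what changed: Replaces the frame-by-frame in_rep flag state machine with a build-maximal-runs-then-filter decomposition: group frames into maximal runs of constant (angle < threshold), then emit (start, start+len) for every non-final below-threshold run with len >= min_frames.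
import Mathlib
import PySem

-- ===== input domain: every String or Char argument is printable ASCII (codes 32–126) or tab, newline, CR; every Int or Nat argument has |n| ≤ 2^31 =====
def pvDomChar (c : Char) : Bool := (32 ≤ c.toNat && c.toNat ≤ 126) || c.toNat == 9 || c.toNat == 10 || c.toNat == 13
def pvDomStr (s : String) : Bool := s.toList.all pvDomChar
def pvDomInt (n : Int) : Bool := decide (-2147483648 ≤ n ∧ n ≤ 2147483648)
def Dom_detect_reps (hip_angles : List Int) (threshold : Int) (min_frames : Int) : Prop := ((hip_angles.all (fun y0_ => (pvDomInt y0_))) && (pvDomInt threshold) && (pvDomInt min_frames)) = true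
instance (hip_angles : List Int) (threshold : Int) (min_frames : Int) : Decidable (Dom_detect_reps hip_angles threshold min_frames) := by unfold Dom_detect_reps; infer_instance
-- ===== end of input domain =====

-- B replaces A's frame-by-frame in_rep flag state machine with a build-maximal-runs-then-filter
-- decomposition (objective: alternative, same cost).

-- ===== PORT A =====
-- the enumerate loop of A as structural recursion over the same state (reps, in_rep, rep_start), i the running index
def detectRepsLoop (threshold min_frames : Int) :
    List Int → Int → List (Int × Int) → Bool → Int → List (Int × Int)
  | [], _, reps, _, _ => reps
  | angle :: rest, i, reps, in_rep, rep_start =>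
      if !in_rep && angle < threshold then
        detectRepsLoop threshold min_frames rest (i + 1) reps true i
      else if in_rep && angle ≥ threshold then
        detectRepsLoop threshold min_frames rest (i + 1)
          (if i - rep_start ≥ min_frames then reps ++ [(rep_start, i)] else reps) false rep_start
      else
        detectRepsLoop threshold min_frames rest (i + 1) reps in_rep rep_start

def detect_reps (hip_angles : List Int) (threshold : Int) (min_frames : Int) : List (Int × Int) :=
  detectRepsLoop threshold min_frames hip_angles 0 [] false 0

-- ===== PORT B =====
-- B's run-building loop: cur = (below, start, length) is the open run; on a predicate flip the
-- run is pushed and a new one opened; the final run is pushed at the end.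
def runsAux (threshold : Int) : List Int → Bool → Int → Int → List (Bool × Int × Int)
  | [], below, s, n => [(below, s, n)]
  | angle :: rest, below, s, n =>
      if decide (angle < threshold) = below then
        runsAux threshold rest below s (n + 1)
      else
        (below, s, n) :: runsAux threshold rest (decide (angle < threshold)) (s + n) 1

-- B's final comprehension over runs[:-1]
def emitRuns (min_frames : Int) (runs : List (Bool × Int × Int)) : List (Int × Int) :=
  runs.dropLast.filterMap (fun r =>
    if r.1 && decide (min_frames ≤ r.2.2) then some (r.2.1, r.2.1 + r.2.2) else none)

def detect_reps_alt (hip_angles : List Int) (threshold : Int) (min_frames : Int) : List (Int × Int) :=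
  match hip_angles with
  | [] => emitRuns min_frames []
  | angle :: rest => emitRuns min_frames (runsAux threshold rest (decide (angle < threshold)) 0 1)

-- ===== PRECONDITION & SPEC =====
def Spec_detect_reps (hip_angles : List Int) (threshold : Int) (min_frames : Int) (out : List (Int × Int)) : Prop := out = detect_reps_alt hip_angles threshold min_frames
instance (hip_angles : List Int) (threshold : Int) (min_frames : Int) (out : List (Int × Int)) : Decidable (Spec_detect_reps hip_angles threshold min_frames out) := by unfold Spec_detect_reps; infer_instance

-- ===== CLAIM (what is proved, stated in full; the proofs are below) =====
def Claim_equal_detect_reps : Prop := ∀ (hip_angles : List Int) (threshold : Int) (min_frames : Int), Dom_detect_reps hip_angles threshold min_frames → Spec_detect_reps hip_angles threshold min_frames (detect_reps hip_angles threshold min_frames)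

-- ===== LEMMAS AND PROOFS =====

theorem runsAux_ne_nil (threshold : Int) (t : List Int) (b : Bool) (s n : Int) :
    runsAux threshold t b s n ≠ [] := by
  induction t generalizing b s n with
  | nil => simp [runsAux]
  | cons a t ih =>
      simp only [runsAux]
      split
      · exact ih _ _ _
      · simp

theorem emitRuns_cons (min_frames : Int) (r : Bool × Int × Int) (rs : List (Bool × Int × Int))
    (h : rs ≠ []) :
    emitRuns min_frames (r :: rs) =
      (if r.1 && decide (min_frames ≤ r.2.2) then [(r.2.1, r.2.1 + r.2.2)] else []) ++
        emitRuns min_frames rs := by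
  unfold emitRuns
  rw [List.dropLast_cons_of_ne_nil h, List.filterMap_cons]
  split <;> simp_all

-- main invariant: the A-loop in state (b, s) at index s + n matches emitting the runs of the
-- rest with the open run (b, s, n); when in_rep the carried rep_start equals s.
theorem loop_eq_emit (threshold min_frames : Int) (t : List Int) :
    ∀ (reps : List (Int × Int)) (b : Bool) (s n s0 : Int),
      (b = true → s0 = s) →
      detectRepsLoop threshold min_frames t (s + n) reps b s0 =
        reps ++ emitRuns min_frames (runsAux threshold t b s n) := by
  induction t with
  | nil =>
      intro reps b s n s0 _
      simp [detectRepsLoop, runsAux, emitRuns]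
  | cons a t ih =>
      intro reps b s n s0 hb
      by_cases hlt : a < threshold
      · cases b with
        | true =>
            have hs0 : s0 = s := hb rfl
            have : detectRepsLoop threshold min_frames (a :: t) (s + n) reps true s0 =
                detectRepsLoop threshold min_frames t (s + n + 1) reps true s0 := by
              simp [detectRepsLoop, hlt, not_le.mpr hlt]
            rw [this, hs0]
            have h1 : s + n + 1 = s + (n + 1) := by ring
            rw [h1, ih reps true s (n + 1) s (fun _ => rfl)]
            simp [runsAux, hlt]
        | false =>
            have : detectRepsLoop threshold min_frames (a :: t) (s + n) reps false s0 =
                detectRepsLoop threshold min_frames t (s + n + 1) reps true (s + n) := by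
              simp [detectRepsLoop, hlt]
            rw [this]
            rw [ih reps true (s + n) 1 (s + n) (fun _ => rfl)]
            have hne := runsAux_ne_nil threshold t true (s + n) 1
            have hr : runsAux threshold (a :: t) false s n =
                (false, s, n) :: runsAux threshold t true (s + n) 1 := by
              simp [runsAux, hlt]
            rw [hr, emitRuns_cons min_frames _ _ hne]
            simp
      · -- a ≥ threshold
        have hge : a ≥ threshold := not_lt.mp hlt
        cases b with
        | true =>
            have hs0 : s0 = s := hb rfl
            have : detectRepsLoop threshold min_frames (a :: t) (s + n) reps true s0 =
                detectRepsLoop threshold min_frames t (s + n + 1)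
                  (if (s + n) - s0 ≥ min_frames then reps ++ [(s0, s + n)] else reps) false s0 := by
              simp [detectRepsLoop, hlt, hge]
            rw [this, hs0]
            rw [ih _ false (s + n) 1 s (by simp)]
            have hne := runsAux_ne_nil threshold t false (s + n) 1
            have hr : runsAux threshold (a :: t) true s n =
                (true, s, n) :: runsAux threshold t false (s + n) 1 := by
              simp [runsAux, hlt]
            rw [hr, emitRuns_cons min_frames _ _ hne]
            have hcond : ((s + n) - s ≥ min_frames) ↔ (min_frames ≤ n) := by omega
            by_cases hmf : min_frames ≤ n
            · rw [if_pos (hcond.mpr hmf)]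
              simp [hmf, List.append_assoc]
            · rw [if_neg (fun h => hmf (hcond.mp h))]
              simp [hmf]
        | false =>
            have : detectRepsLoop threshold min_frames (a :: t) (s + n) reps false s0 =
                detectRepsLoop threshold min_frames t (s + n + 1) reps false s0 := by
              simp [detectRepsLoop, hlt, hge]
            rw [this]
            have h1 : s + n + 1 = s + (n + 1) := by ring
            rw [h1, ih reps false s (n + 1) s0 (by simp)]
            simp [runsAux, hlt]

-- ===== VERDICT (by name: the statement is the Claim_ definition above) =====
theorem detect_reps_spec : Claim_equal_detect_reps := by
  intro hip_angles threshold min_frames _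
  unfold Spec_detect_reps detect_reps detect_reps_alt
  cases hip_angles with
  | nil => simp [detectRepsLoop, emitRuns]
  | cons a t =>
      by_cases hlt : a < threshold
      · have : detectRepsLoop threshold min_frames (a :: t) 0 [] false 0 =
            detectRepsLoop threshold min_frames t (0 + 1) [] true 0 := by
          simp [detectRepsLoop, hlt]
        rw [this, loop_eq_emit threshold min_frames t [] true 0 1 0 (fun _ => rfl)]
        simp [hlt]
      · have hge : a ≥ threshold := not_lt.mp hlt
        have : detectRepsLoop threshold min_frames (a :: t) 0 [] false 0 =
            detectRepsLoop threshold min_frames t (0 + 1) [] false 0 := by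
          simp [detectRepsLoop, hlt, hge]
        rw [this, loop_eq_emit threshold min_frames t [] false 0 1 0 (by simp)]
        simp [hlt]
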